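-- pv_equiv track=rewrite | github.com/kimyt511/baekjoon | 2023/11/11_16.py | prod3
-- ===== SOURCE A (Python) =====
-- def prod(n):
--     val = 1
--     for c in str(n):
--         val *= int(c)
--     return val
--
-- def prod3(n):
--     if len(str(n)) < 3:
--         return prod(n)
--     arr = sorted(list(str(n)), reverse=True)
--     val = 1
--     for i in range(3):
--         val *= int(arr[i])
--     return val
-- ===== SOURCE B (Python) =====
-- def prod3(n):
--     s = str(n)
--     if len(s) < 3:
--         val = 1
--         for c in s:
--             val *= int(c)
--         return val
--     # one O(d) pass keeping the three largest characters (a >= b >= c), no full sort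
--     a, b, c = s[0], s[1], s[2]
--     if b > a:
--         a, b = b, a
--     if c > a:
--         a, b, c = c, a, b
--     elif c > b:
--         b, c = c, b
--     for ch in s[3:]:
--         if ch >= a:
--             a, b, c = ch, a, b
--         elif ch >= b:
--             b, c = ch, b
--         elif ch >= c:
--             c = ch
--     return int(a) * int(b) * int(c)
-- ===== Notes on version B (the rewrite author's own statement) =====
-- stated objective: alternative
-- what changed: B replaces A's full descending sort of the digit string by a single left-to-right pass that maintains the three largest characters in three registers (top-k selection), multiplying their int() values at the end; the short-string branch inlines prod.
-- outside the precondition, e.g. on prod3(-1): A raises ValueError, B raises ValueError; on prod3(-99): A raises ValueError, B raises ValueError; on prod3(-42): A raises ValueError, B raises ValueError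
import Mathlib
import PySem

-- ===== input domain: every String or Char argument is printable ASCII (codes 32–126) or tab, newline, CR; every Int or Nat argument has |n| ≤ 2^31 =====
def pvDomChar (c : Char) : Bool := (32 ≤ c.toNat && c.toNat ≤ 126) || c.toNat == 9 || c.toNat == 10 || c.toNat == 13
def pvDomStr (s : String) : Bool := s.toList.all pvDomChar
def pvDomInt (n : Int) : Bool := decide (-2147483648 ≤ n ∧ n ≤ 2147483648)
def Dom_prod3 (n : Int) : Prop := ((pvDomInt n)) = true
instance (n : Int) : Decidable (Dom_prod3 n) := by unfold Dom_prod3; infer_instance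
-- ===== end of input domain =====

-- B replaces A's full descending sort by one pass keeping the three largest characters
-- (an alternative top-k selection of similar cost on these bounded inputs; no speed claim).

-- ===== PORT A =====
-- int(c) for a single character; Pre_prod3 excludes the inputs where Python's int() raises ('-')
def pvDig (c : Char) : Int := (PySem.Int.ofChars? [c]).getD 0

-- helper prod(n) of A
def pvProd (n : Int) : Int :=
  (PySem.Int.toChars n).foldl (fun val c => val * pvDig c) 1

def prod3 (n : Int) : Int :=
  if (PySem.Int.toChars n).length < 3 then pvProd n
  else
    let arr := PySem.List.sorted (PySem.Int.toChars n) (fun x => x) true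
    (PySem.List.pyRange 0 3 1).foldl
      (fun val i => val * pvDig ((PySem.List.pyGet? arr i).getD ' ')) 1

-- ===== PORT B =====
-- B's initial ordering of the first three characters (the two 'if' statements of Source B)
def pvSort3 (c0 c1 c2 : Char) : Char × Char × Char :=
  if c0 < c1 then
    if c1 < c2 then (c2, c1, c0)
    else if c0 < c2 then (c1, c2, c0)
    else (c1, c0, c2)
  else
    if c0 < c2 then (c2, c0, c1)
    else if c1 < c2 then (c0, c2, c1)
    else (c0, c1, c2)

-- one step of B's loop: keep the three largest characters seen so far, in descending order
def pvStep (t : Char × Char × Char) (ch : Char) : Char × Char × Char :=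
  if t.1 ≤ ch then (ch, t.1, t.2.1)
  else if t.2.1 ≤ ch then (t.1, ch, t.2.1)
  else if t.2.2 ≤ ch then (t.1, t.2.1, ch)
  else t

def prod3_alt (n : Int) : Int :=
  let s := PySem.Int.toChars n
  if s.length < 3 then
    s.foldl (fun val c => val * pvDig c) 1
  else
    match s with
    | c0 :: c1 :: c2 :: rest =>
      let r := rest.foldl pvStep (pvSort3 c0 c1 c2)
      pvDig r.1 * pvDig r.2.1 * pvDig r.2.2
    | _ => 0  -- unreachable: s.length ≥ 3 here

-- ===== PRECONDITION & SPEC =====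
-- Pre_ excludes exactly -99 ≤ n ≤ -1, where Python's int('-') raises ValueError in both A and B.
def Pre_prod3 (n : Int) : Prop := 0 ≤ n ∨ n ≤ -100
instance (n : Int) : Decidable (Pre_prod3 n) := by unfold Pre_prod3; infer_instance
def pvWitness_prod3 : Int := 2023

def Spec_prod3 (n : Int) (out : Int) : Prop := out = prod3_alt n
instance (n : Int) (out : Int) : Decidable (Spec_prod3 n out) := by unfold Spec_prod3; infer_instance

-- ===== CLAIM (what is proved, stated in full; the proofs are below) =====
def Claim_equal_prod3 : Prop := ∀ (n : Int), Dom_prod3 n → Pre_prod3 n → Spec_prod3 n (prod3 n)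

-- ===== LEMMAS AND PROOFS =====

-- descending-sorted lists that are permutations are equal (Char's order is antisymmetric)
theorem pvSortedDesc_eq (xs ys : List Char) (hp : ys.Perm xs)
    (hs : ys.Pairwise (fun a b => b ≤ a)) :
    PySem.List.sorted xs (fun x => x) true = ys := by
  have h1 : (PySem.List.sorted xs (fun x => x) true).Perm ys :=
    (PySem.List.sorted_perm xs (fun x => x) true).trans hp.symm
  have h2 : (PySem.List.sorted xs (fun x => x) true).Pairwise (fun a b => b ≤ a) :=
    PySem.List.sorted_pairwise_rev xs (fun x => x)
  exact List.Perm.eq_of_pairwise (fun a b _ _ hab hba => le_antisymm hba hab) h2 hs h1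

-- insertion into a descending list
def pvIns (d : Char) : List Char → List Char
  | [] => [d]
  | x :: xs => if x ≤ d then d :: x :: xs else x :: pvIns d xs

theorem pvIns_perm (d : Char) (l : List Char) : (pvIns d l).Perm (d :: l) := by
  induction l with
  | nil => simp [pvIns]
  | cons x xs ih =>
    simp only [pvIns]
    split
    · exact List.Perm.refl _
    · exact (ih.cons x).trans (List.Perm.swap d x xs)

theorem pvIns_pairwise (d : Char) (l : List Char)
    (h : l.Pairwise (fun a b => b ≤ a)) :
    (pvIns d l).Pairwise (fun a b => b ≤ a) := by
  induction l with
  | nil => simp [pvIns]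
  | cons x xs ih =>
    rcases List.pairwise_cons.mp h with ⟨hx, hxs⟩
    simp only [pvIns]
    split
    · rename_i hxd
      refine List.pairwise_cons.mpr ⟨?_, h⟩
      intro e he
      rcases List.mem_cons.mp he with rfl | he'
      · exact hxd
      · exact le_trans (hx e he') hxd
    · rename_i hxd
      refine List.pairwise_cons.mpr ⟨?_, ih hxs⟩
      intro e he
      have hm := (pvIns_perm d xs).mem_iff.mp he
      rcases List.mem_cons.mp hm with rfl | he'
      · exact le_of_not_ge hxd
      · exact hx e he'

-- inserting an element ≤ the third element of a descending list keeps the first three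
theorem pvIns_take3 (d x y z : Char) (t : List Char)
    (hdz : d ≤ z) (hzy : z ≤ y) (hyx : y ≤ x) :
    ∃ t', pvIns d (x :: y :: z :: t) = x :: y :: z :: t' := by
  simp only [pvIns]
  split
  · rename_i hxd
    have hx : x = d := le_antisymm hxd (le_trans hdz (le_trans hzy hyx))
    have hy : y = d := le_antisymm (le_trans hyx hxd) (le_trans hdz hzy)
    have hz : z = d := le_antisymm (le_trans hzy (le_trans hyx hxd)) hdz
    exact ⟨z :: t, by simp [hx, hy, hz]⟩
  · split
    · rename_i _ hyd
      have hy : y = d := le_antisymm hyd (le_trans hdz hzy)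
      have hz : z = d := le_antisymm (le_trans hzy hyd) hdz
      exact ⟨z :: t, by simp [hy, hz]⟩
    · split
      · rename_i _ _ hzd
        have hz : z = d := le_antisymm hzd hdz
        exact ⟨z :: t, by simp [hz]⟩
      · exact ⟨pvIns d t, rfl⟩

-- the third element of a descending list dominates d when the list holds three elements ≥ d
theorem pvThird_ge (x y z d a' b' c' : Char) (t rest : List Char)
    (hperm : (x :: y :: z :: t).Perm (a' :: b' :: c' :: rest))
    (hpw : (x :: y :: z :: t).Pairwise (fun p q => q ≤ p))
    (h1 : d ≤ c') (h2 : c' ≤ b') (h3 : b' ≤ a') : d ≤ z := by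
  by_contra hcon
  rw [not_le] at hcon
  have hc := hperm.countP_eq (fun e => decide (d ≤ e))
  have hz : ∀ e ∈ z :: t, e ≤ z := by
    intro e he
    rcases List.mem_cons.mp he with rfl | he'
    · exact le_refl _
    · have h' := (List.pairwise_cons.mp (List.pairwise_cons.mp hpw).2).2
      exact (List.pairwise_cons.mp h').1 e he'
  have hzero : (z :: t).countP (fun e => decide (d ≤ e)) = 0 := by
    apply List.countP_eq_zero.mpr
    intro e he
    simp only [decide_eq_true_eq]
    exact not_le.mpr (lt_of_le_of_lt (hz e he) hcon)
  have hle : (x :: y :: z :: t).countP (fun e => decide (d ≤ e)) ≤ 2 := by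
    simp only [List.countP_cons, hzero]
    split_ifs <;> omega
  have hge : 3 ≤ (a' :: b' :: c' :: rest).countP (fun e => decide (d ≤ e)) := by
    have p1 : d ≤ a' := le_trans h1 (le_trans h2 h3)
    have p2 : d ≤ b' := le_trans h1 h2
    simp [p1, p2, h1]
  omega

-- one pvStep: the new triple is descending and the four inputs are the triple plus a dropped minimum d
theorem pvStep_spec (a b c ch : Char) (h1 : c ≤ b) (h2 : b ≤ a) :
    ∃ d, d ≤ (pvStep (a, b, c) ch).2.2 ∧
      (pvStep (a, b, c) ch).2.2 ≤ (pvStep (a, b, c) ch).2.1 ∧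
      (pvStep (a, b, c) ch).2.1 ≤ (pvStep (a, b, c) ch).1 ∧
      ([a, b, c, ch] : List Char).Perm
        (d :: (pvStep (a, b, c) ch).1 :: (pvStep (a, b, c) ch).2.1 :: [(pvStep (a, b, c) ch).2.2]) := by
  simp only [pvStep]
  split
  · rename_i hac
    refine ⟨c, h1, h2, hac, ?_⟩
    exact List.perm_append_comm (l₁ := [a, b]) (l₂ := [c, ch])
  · split
    · rename_i hac hbc
      refine ⟨c, h1, hbc, le_of_not_ge hac, ?_⟩
      have s1 : ([b, c, ch] : List Char).Perm [c, ch, b] :=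
        List.perm_append_comm (l₁ := [b]) (l₂ := [c, ch])
      have s2 : ([a, c, ch, b] : List Char).Perm [c, a, ch, b] := List.Perm.swap c a [ch, b]
      exact (s1.cons a).trans s2
    · split
      · rename_i hac hbc hcc
        refine ⟨c, hcc, le_of_not_ge hbc, h2, ?_⟩
        have s1 : ([b, c, ch] : List Char).Perm [c, b, ch] := List.Perm.swap c b [ch]
        have s2 : ([a, c, b, ch] : List Char).Perm [c, a, b, ch] := List.Perm.swap c a [b, ch]
        exact (s1.cons a).trans s2
      · rename_i hac hbc hcc
        refine ⟨ch, le_of_not_ge hcc, h1, h2, ?_⟩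
        exact List.perm_append_comm (l₁ := [a, b, c]) (l₂ := [ch])

-- pvSort3 sorts its three arguments descending and is a permutation of them
theorem pvSort3_spec (c0 c1 c2 : Char) :
    (pvSort3 c0 c1 c2).2.2 ≤ (pvSort3 c0 c1 c2).2.1 ∧
    (pvSort3 c0 c1 c2).2.1 ≤ (pvSort3 c0 c1 c2).1 ∧
    ([c0, c1, c2] : List Char).Perm
      ((pvSort3 c0 c1 c2).1 :: (pvSort3 c0 c1 c2).2.1 :: [(pvSort3 c0 c1 c2).2.2]) := by
  unfold pvSort3
  split_ifs with h01 h12 h02 h02' h12'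
  · refine ⟨le_of_lt h01, le_of_lt h12, ?_⟩
    have s1 : ([c0, c1, c2] : List Char).Perm [c2, c0, c1] :=
      List.perm_append_comm (l₁ := [c0, c1]) (l₂ := [c2])
    exact s1.trans ((List.Perm.swap c1 c0 []).cons c2)
  · refine ⟨le_of_lt h02, not_lt.mp h12, ?_⟩
    exact List.perm_append_comm (l₁ := [c0]) (l₂ := [c1, c2])
  · exact ⟨not_lt.mp h02, le_of_lt h01, List.Perm.swap c1 c0 [c2]⟩
  · refine ⟨not_lt.mp h01, le_of_lt h02', ?_⟩
    exact List.perm_append_comm (l₁ := [c0, c1]) (l₂ := [c2])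
  · exact ⟨le_of_lt h12', not_lt.mp h02', (List.Perm.swap c2 c1 []).cons c0⟩
  · exact ⟨not_lt.mp h12', not_lt.mp h01, List.Perm.refl _⟩

-- main invariant: B's fold computes the first three elements of the descending sort
theorem pvFold_top3 : ∀ (rest : List Char) (a b c : Char), c ≤ b → b ≤ a →
    ∃ t, PySem.List.sorted (a :: b :: c :: rest) (fun x => x) true =
      (rest.foldl pvStep (a, b, c)).1 :: (rest.foldl pvStep (a, b, c)).2.1 ::
        (rest.foldl pvStep (a, b, c)).2.2 :: t := by
  intro rest
  induction rest with
  | nil =>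
    intro a b c h1 h2
    refine ⟨[], ?_⟩
    apply pvSortedDesc_eq
    · exact List.Perm.refl _
    · refine List.pairwise_cons.mpr ⟨?_, List.pairwise_cons.mpr ⟨?_, ?_⟩⟩
      · intro e he
        rcases List.mem_cons.mp he with rfl | he'
        · exact h2
        · simp only [List.mem_singleton] at he'
          subst he'
          exact le_trans h1 h2
      · intro e he
        simp only [List.mem_singleton] at he
        subst he
        exact h1
      · simp
  | cons ch rest ih =>
    intro a b c h1 h2
    obtain ⟨d, hd, hcb, hba, hperm4⟩ := pvStep_spec a b c ch h1 h2
    have hq : pvStep (a, b, c) ch = ((pvStep (a, b, c) ch).1, (pvStep (a, b, c) ch).2.1, (pvStep (a, b, c) ch).2.2) := rfl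
    obtain ⟨t', ht'⟩ := ih (pvStep (a, b, c) ch).1 (pvStep (a, b, c) ch).2.1 (pvStep (a, b, c) ch).2.2 hcb hba
    rw [← hq] at ht'
    -- the fold over ch :: rest is the fold over rest from the stepped triple
    have hfold : (ch :: rest).foldl pvStep (a, b, c) = rest.foldl pvStep (pvStep (a, b, c) ch) := rfl
    -- the whole sorted list is an insertion of d into the sorted stepped list
    have hperm5 : (a :: b :: c :: ch :: rest).Perm
        (d :: (pvStep (a, b, c) ch).1 :: (pvStep (a, b, c) ch).2.1 :: (pvStep (a, b, c) ch).2.2 :: rest) := by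
      have := hperm4.append_right rest
      simpa using this
    have hL2pw : (PySem.List.sorted ((pvStep (a, b, c) ch).1 :: (pvStep (a, b, c) ch).2.1 :: (pvStep (a, b, c) ch).2.2 :: rest) (fun x => x) true).Pairwise (fun p q => q ≤ p) :=
      PySem.List.sorted_pairwise_rev _ _
    have hL2perm : (PySem.List.sorted ((pvStep (a, b, c) ch).1 :: (pvStep (a, b, c) ch).2.1 :: (pvStep (a, b, c) ch).2.2 :: rest) (fun x => x) true).Perm
        ((pvStep (a, b, c) ch).1 :: (pvStep (a, b, c) ch).2.1 :: (pvStep (a, b, c) ch).2.2 :: rest) :=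
      PySem.List.sorted_perm _ _ _
    rw [ht'] at hL2pw hL2perm
    have hdz : d ≤ (rest.foldl pvStep (pvStep (a, b, c) ch)).2.2 :=
      pvThird_ge _ _ _ d _ _ _ t' rest hL2perm hL2pw hd hcb hba
    have hzy : (rest.foldl pvStep (pvStep (a, b, c) ch)).2.2 ≤ (rest.foldl pvStep (pvStep (a, b, c) ch)).2.1 :=
      (List.pairwise_cons.mp (List.pairwise_cons.mp hL2pw).2).1 _ (by simp)
    have hyx : (rest.foldl pvStep (pvStep (a, b, c) ch)).2.1 ≤ (rest.foldl pvStep (pvStep (a, b, c) ch)).1 :=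
      (List.pairwise_cons.mp hL2pw).1 _ (by simp)
    obtain ⟨t'', ht''⟩ := pvIns_take3 d _ _ _ t' hdz hzy hyx
    refine ⟨t'', ?_⟩
    rw [hfold, ← ht'']
    apply pvSortedDesc_eq
    · exact ((pvIns_perm d _).trans (hL2perm.cons d)).trans hperm5.symm
    · exact pvIns_pairwise d _ hL2pw

-- ===== VERDICT (by name: the statement is the Claim_ definition above) =====
theorem prod3_spec : Claim_equal_prod3 := by
  intro n _ _
  unfold Spec_prod3
  unfold prod3 prod3_alt
  by_cases h : (PySem.Int.toChars n).length < 3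
  · simp only [if_pos h]
    rfl
  · simp only [if_neg h]
    rcases hs : PySem.Int.toChars n with _ | ⟨c0, _ | ⟨c1, _ | ⟨c2, rest⟩⟩⟩
    · rw [hs] at h; simp at h
    · rw [hs] at h; simp at h
    · rw [hs] at h; simp at h
    · obtain ⟨h32, h21, hperm3⟩ := pvSort3_spec c0 c1 c2
      obtain ⟨t, ht⟩ := pvFold_top3 rest (pvSort3 c0 c1 c2).1 (pvSort3 c0 c1 c2).2.1 (pvSort3 c0 c1 c2).2.2 h32 h21
      have heta : ((pvSort3 c0 c1 c2).1, (pvSort3 c0 c1 c2).2.1, (pvSort3 c0 c1 c2).2.2) = pvSort3 c0 c1 c2 := rfl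
      rw [heta] at ht
      have hp4 : (c0 :: c1 :: c2 :: rest).Perm
          ((pvSort3 c0 c1 c2).1 :: (pvSort3 c0 c1 c2).2.1 :: (pvSort3 c0 c1 c2).2.2 :: rest) := by
        simpa using hperm3.append_right rest
      have harr : PySem.List.sorted (c0 :: c1 :: c2 :: rest) (fun x => x) true
          = (rest.foldl pvStep (pvSort3 c0 c1 c2)).1 :: (rest.foldl pvStep (pvSort3 c0 c1 c2)).2.1 ::
            (rest.foldl pvStep (pvSort3 c0 c1 c2)).2.2 :: t := by
        rw [← ht]
        apply pvSortedDesc_eq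
        · exact (PySem.List.sorted_perm _ _ _).trans hp4.symm
        · exact PySem.List.sorted_pairwise_rev _ _
      have hr : PySem.List.pyRange 0 3 1 = [0, 1, 2] := by decide
      rw [harr, hr]
      simp [PySem.List.pyGet?, PySem.List.pyIdx?]
      split_ifs <;> try omega
      simp
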